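-- pv_equiv track=rewrite | github.com/castlenthesky/template-python-basic | src/services/guide/templates.py | _generate_breadcrumb_html
-- ===== SOURCE A (Python) =====
-- from typing import List
--
-- def _generate_breadcrumb_html(breadcrumbs: List[str], base_url: str) -> str:
--     """Generate breadcrumb navigation HTML."""
--     if not breadcrumbs:
--         return ""
--
--     crumbs = []
--     current_path = base_url
--
--     for i, crumb in enumerate(breadcrumbs):
--         if i == len(breadcrumbs) - 1:
--             # Current page - not a link
--             crumbs.append(f'<span class="breadcrumb-current">{crumb}</span>')
--         else:
--             if i == 0:
--                 # Home link
--                 crumbs.append(f'<a href="{base_url}/">{crumb}</a>')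
--             else:
--                 # Build path for intermediate crumbs
--                 current_path += f"/{breadcrumbs[i]}"
--                 crumbs.append(f'<a href="{current_path}">{crumb}</a>')
--
--     return ' / '.join(crumbs)
-- ===== SOURCE B (Python) =====
-- def _generate_breadcrumb_html(breadcrumbs, base_url):
--     """Generate breadcrumb navigation HTML (index-based, no running path accumulator)."""
--     if not breadcrumbs:
--         return ""
--     n = len(breadcrumbs)
--
--     def crumb_html(i):
--         if i == n - 1:
--             return f'<span class="breadcrumb-current">{breadcrumbs[i]}</span>'
--         if i == 0:
--             return f'<a href="{base_url}/">{breadcrumbs[i]}</a>'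
--         # path accumulates breadcrumbs[1..i] (the first breadcrumb never enters the path)
--         return '<a href="' + base_url + '/' + '/'.join(breadcrumbs[1:i + 1]) + f'">{breadcrumbs[i]}</a>'
--
--     return ' / '.join(crumb_html(i) for i in range(n))
-- ===== Notes on version B (the rewrite author's own statement) =====
-- stated objective: alternative
-- what changed: Each crumb's HTML is computed independently from its index (href rebuilt as base_url + '/' + '/'.join(breadcrumbs[1:i+1])) and collected via a comprehension over range(n), instead of one loop threading a mutable current_path accumulator.
import Mathlib
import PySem

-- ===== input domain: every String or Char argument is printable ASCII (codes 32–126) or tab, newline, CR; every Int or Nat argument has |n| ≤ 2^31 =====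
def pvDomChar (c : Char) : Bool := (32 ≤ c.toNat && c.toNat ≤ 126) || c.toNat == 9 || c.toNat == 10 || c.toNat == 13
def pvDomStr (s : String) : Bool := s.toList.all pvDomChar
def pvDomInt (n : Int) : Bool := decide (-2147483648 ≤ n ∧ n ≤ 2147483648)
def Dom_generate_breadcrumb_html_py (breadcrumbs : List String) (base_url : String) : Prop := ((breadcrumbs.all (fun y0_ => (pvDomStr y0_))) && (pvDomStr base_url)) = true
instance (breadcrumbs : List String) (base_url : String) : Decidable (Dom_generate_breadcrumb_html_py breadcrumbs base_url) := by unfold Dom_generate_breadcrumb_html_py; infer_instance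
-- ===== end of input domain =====

-- B recomputes each crumb independently from its index instead of threading A's running
-- current_path accumulator; alternative decomposition, same return value.

-- ===== PORT A =====
-- A's loop body as a named helper: same state (crumbs, current_path), same branch order.
-- breadcrumbs[i] is always in range here, ported as pyGetD with default "" (exact on in-range indices).
def pvStepA (breadcrumbs : List String) (base_url : String)
    (st : List String × String) (p : Int × String) : List String × String :=
  if p.1 = PySem.List.len breadcrumbs - 1 then
    (st.1 ++ ["<span class=\"breadcrumb-current\">" ++ p.2 ++ "</span>"], st.2)
  else if p.1 = 0 then
    (st.1 ++ ["<a href=\"" ++ base_url ++ "/\">" ++ p.2 ++ "</a>"], st.2)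
  else
    let current_path := st.2 ++ "/" ++ PySem.List.pyGetD breadcrumbs p.1 ""
    (st.1 ++ ["<a href=\"" ++ current_path ++ "\">" ++ p.2 ++ "</a>"], current_path)

def generate_breadcrumb_html_py (breadcrumbs : List String) (base_url : String) : String :=
  if breadcrumbs = [] then ""
  else
    PySem.Str.join " / "
      ((PySem.List.enumerate breadcrumbs).foldl (pvStepA breadcrumbs base_url) ([], base_url)).1

-- ===== PORT B =====
-- B's crumb_html helper: each crumb's HTML from its index alone.
def pvCrumbB (breadcrumbs : List String) (base_url : String) (i : Int) : String :=
  let c := PySem.List.pyGetD breadcrumbs i ""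
  if i = PySem.List.len breadcrumbs - 1 then
    "<span class=\"breadcrumb-current\">" ++ c ++ "</span>"
  else if i = 0 then
    "<a href=\"" ++ base_url ++ "/\">" ++ c ++ "</a>"
  else
    "<a href=\"" ++ base_url ++ "/" ++
      PySem.Str.join "/" (PySem.List.slice breadcrumbs (some 1) (some (i + 1))) ++
      "\">" ++ c ++ "</a>"

def generate_breadcrumb_html_py_alt (breadcrumbs : List String) (base_url : String) : String :=
  if breadcrumbs = [] then ""
  else
    PySem.Str.join " / "
      ((PySem.List.pyRange 0 (PySem.List.len breadcrumbs)).map (pvCrumbB breadcrumbs base_url))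

-- ===== PRECONDITION & SPEC =====
def Spec_generate_breadcrumb_html_py (breadcrumbs : List String) (base_url : String) (out : String) : Prop := out = generate_breadcrumb_html_py_alt breadcrumbs base_url
instance (breadcrumbs : List String) (base_url : String) (out : String) : Decidable (Spec_generate_breadcrumb_html_py breadcrumbs base_url out) := by unfold Spec_generate_breadcrumb_html_py; infer_instance

-- ===== CLAIM (what is proved, stated in full; the proofs are below) =====
def Claim_equal_generate_breadcrumb_html_py : Prop := ∀ (breadcrumbs : List String) (base_url : String), Dom_generate_breadcrumb_html_py breadcrumbs base_url → Spec_generate_breadcrumb_html_py breadcrumbs base_url (generate_breadcrumb_html_py breadcrumbs base_url)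

-- ===== LEMMAS AND PROOFS =====

-- current_path after A has processed indices 0..m (m path elements collected, xs[0] never enters)
def pvPath (xs : List String) (base : String) (m : Nat) : String :=
  base ++ String.ofList (((xs.drop 1).take m).flatMap (fun s => '/' :: s.toList))

theorem pvPath_zero (xs : List String) (base : String) : pvPath xs base 0 = base := by
  rw [← String.toList_inj]
  simp [pvPath]

theorem pv_slashJoin (l : List (List Char)) (h : l ≠ []) :
    '/' :: PySem.Chars.join ['/'] l = l.flatMap (fun p => '/' :: p) := by
  induction l with
  | nil => cases h rfl
  | cons p rest ih =>
    cases rest with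
    | nil => simp [PySem.Chars.join_singleton]
    | cons q r =>
      rw [PySem.Chars.join_cons_cons]
      have := ih (by simp)
      simp only [List.flatMap_cons] at this ⊢
      simp only [← this]
      simp

theorem pvPath_succ (xs : List String) (base : String) (m : Nat) (h : m + 1 < xs.length) :
    pvPath xs base m ++ "/" ++ PySem.List.pyGetD xs ((m : Int) + 1) "" = pvPath xs base (m + 1) := by
  have hc : ((m : Int) + 1) = ((m + 1 : Nat) : Int) := by push_cast; ring
  rw [hc, PySem.List.pyGetD_natCast]
  have hget : (xs.drop 1)[m]? = some (xs.getD (m + 1) "") := by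
    rw [List.getElem?_drop, show 1 + m = m + 1 from by omega]
    simp [List.getD, List.getElem?_eq_getElem h]
  have htake : (xs.drop 1).take (m + 1) = (xs.drop 1).take m ++ [xs.getD (m + 1) ""] := by
    rw [List.take_add_one, hget]
    rfl
  rw [← String.toList_inj]
  simp only [pvPath, String.toList_append, String.toList_ofList, htake]
  have hslash : ("/" : String).toList = ['/'] := by decide
  simp [hslash]

theorem pvPath_eq_href (xs : List String) (base : String) (i : Nat) (h1 : 1 ≤ i) (h2 : i < xs.length) :
    pvPath xs base i =
      base ++ "/" ++ PySem.Str.join "/" (PySem.List.slice xs (some 1) (some ((i : Int) + 1))) := by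
  have hc : ((i : Int) + 1) = ((i + 1 : Nat) : Int) := by push_cast; ring
  have hone : (1 : Int) = ((1 : Nat) : Int) := by norm_num
  rw [hc, hone, PySem.List.slice_natCast]
  have hsl : i + 1 - 1 = i := by omega
  rw [hsl, ← String.toList_inj]
  simp only [pvPath, String.toList_append, String.toList_ofList, PySem.Str.toList_join]
  have hslash : ("/" : String).toList = ['/'] := by decide
  have hne : (List.take i (xs.drop 1)).map String.toList ≠ [] := by
    intro hemp
    have hl := congrArg List.length hemp
    simp at hl
    omega
  rw [hslash, List.append_assoc]
  congr 1
  rw [List.singleton_append, pv_slashJoin _ hne, List.flatMap_map]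

theorem pv_foldA (xs : List String) (base : String) :
    ∀ (k m : Nat), (m + 1) + k = xs.length → ∀ (crumbs : List String),
      (((PySem.List.pyRange ((m : Int) + 1) (PySem.List.len xs)).map
          (fun j => (j, PySem.List.pyGetD xs j ""))).foldl (pvStepA xs base)
            (crumbs, pvPath xs base m)).1
        = crumbs ++ (PySem.List.pyRange ((m : Int) + 1) (PySem.List.len xs)).map (pvCrumbB xs base) := by
  intro k
  induction k with
  | zero =>
    intro m hm crumbs
    have hr : PySem.List.pyRange ((m : Int) + 1) ((xs.length : Int)) = [] := by
      simp [PySem.List.pyRange]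
      omega
    simp [PySem.List.len, hr]
  | succ k ih =>
    intro m hm crumbs
    have hlt : ((m : Int) + 1) < PySem.List.len xs := by
      simp [PySem.List.len]; omega
    rw [PySem.List.pyRange_one_cons hlt]
    simp only [List.map_cons, List.foldl_cons]
    rcases Nat.eq_zero_or_pos k with hk0 | hkpos
    · -- last index: m + 1 = length - 1
      subst hk0
      have hlast : ((m : Int) + 1) = (xs.length : Int) - 1 := by omega
      have hr2 : PySem.List.pyRange ((xs.length : Int)) ((xs.length : Int)) = [] := by
        simp [PySem.List.pyRange]
      simp [pvStepA, pvCrumbB, PySem.List.len, hlast, hr2]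
    · -- intermediate index
      have hne1 : ((m : Int) + 1) ≠ PySem.List.len xs - 1 := by
        simp [PySem.List.len]; omega
      have hne0 : ((m : Int) + 1) ≠ 0 := by omega
      simp only [pvStepA, if_neg hne1, if_neg hne0]
      have hstep : pvPath xs base m ++ "/" ++ PySem.List.pyGetD xs ((m : Int) + 1) "" =
          pvPath xs base (m + 1) := pvPath_succ xs base m (by omega)
      simp only [hstep]
      have hcrumb : "<a href=\"" ++ pvPath xs base (m + 1) ++ "\">" ++ PySem.List.pyGetD xs ((m : Int) + 1) "" ++ "</a>"
          = pvCrumbB xs base ((m : Int) + 1) := by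
        rw [pvCrumbB]
        simp only [if_neg hne1, if_neg hne0]
        rw [pvPath_eq_href xs base (m + 1) (by omega) (by omega)]
        rw [← String.toList_inj]
        push_cast
        simp [String.toList_append]
      rw [hcrumb]
      have hcast : ((m : Int) + 1 + 1) = (((m + 1 : Nat) : Int) + 1) := by push_cast; ring
      have := ih (m + 1) (by omega) (crumbs ++ [pvCrumbB xs base ((m : Int) + 1)])
      rw [hcast]
      rw [this]
      simp

theorem generate_breadcrumb_html_py_eq (xs : List String) (base : String) :
    generate_breadcrumb_html_py xs base = generate_breadcrumb_html_py_alt xs base := by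
  by_cases hnil : xs = []
  · simp [generate_breadcrumb_html_py, generate_breadcrumb_html_py_alt, hnil]
  · have hlen : 1 ≤ xs.length := by
      cases xs with
      | nil => cases hnil rfl
      | cons a t => simp
    rw [generate_breadcrumb_html_py, generate_breadcrumb_html_py_alt, if_neg hnil, if_neg hnil]
    rw [PySem.List.enumerate_eq_map_pyRange xs ""]
    congr 1
    have h0 : (0 : Int) < PySem.List.len xs := by simp [PySem.List.len]; omega
    rw [PySem.List.pyRange_one_cons h0]
    simp only [List.map_cons, List.foldl_cons]
    by_cases h1 : xs.length = 1
    · have hlast : (0 : Int) = (xs.length : Int) - 1 := by omega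
      have hr : PySem.List.pyRange (1 : Int) ((xs.length : Int)) = [] := by
        simp [PySem.List.pyRange]
        omega
      simp [pvStepA, pvCrumbB, PySem.List.len, ← hlast, hr]
    · have hne1 : ¬ ((0 : Int) = (xs.length : Int) - 1) := by omega
      have hstep0 : pvStepA xs base (([], base) : List String × String) (0, PySem.List.pyGetD xs 0 "") =
          (["<a href=\"" ++ base ++ "/\">" ++ PySem.List.pyGetD xs 0 "" ++ "</a>"], pvPath xs base 0) := by
        simp [pvStepA, PySem.List.len, hne1, pvPath_zero]
      rw [hstep0]
      have hfold := pv_foldA xs base (xs.length - 1) 0 (by omega)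
          ["<a href=\"" ++ base ++ "/\">" ++ PySem.List.pyGetD xs 0 "" ++ "</a>"]
      simp only [Nat.cast_zero, zero_add, PySem.List.len] at hfold ⊢
      rw [hfold]
      have hc0 : pvCrumbB xs base 0 = "<a href=\"" ++ base ++ "/\">" ++ PySem.List.pyGetD xs 0 "" ++ "</a>" := by
        simp [pvCrumbB, PySem.List.len, hne1]
      simp [hc0]

-- ===== VERDICT (by name: the statement is the Claim_ definition above) =====
theorem generate_breadcrumb_html_py_spec : Claim_equal_generate_breadcrumb_html_py := by
  intro breadcrumbs base_url _
  unfold Spec_generate_breadcrumb_html_py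
  exact generate_breadcrumb_html_py_eq breadcrumbs base_url
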